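-- pv_equiv track=rewrite | github.com/Serguchers/Count-For-You | calcs.py | find_best_offer
-- ===== SOURCE A (Python) =====
-- def find_best_offer(data):
--     buy_to_check = {
--         resource: data[resource]["buy"]
--         for resource in data
--         if data[resource]["buy"] != 0
--     }
--     sell_to_check = {
--         resource: data[resource]["sell"]
--         for resource in data
--         if data[resource]["sell"] != 0
--     }
--     best_buy = min(buy_to_check, key=lambda x: buy_to_check[x])
--     best_sell = max(sell_to_check, key=lambda x: sell_to_check[x])
--     return best_buy, best_sell
-- ===== SOURCE B (Python) =====
-- def find_best_offer(data):
--     best_buy = None   # (resource, price) with the lowest nonzero buy price seen so far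
--     best_sell = None  # (resource, price) with the highest nonzero sell price seen so far
--     for resource in data:
--         b = data[resource]["buy"]
--         s = data[resource]["sell"]
--         if b != 0 and (best_buy is None or b < best_buy[1]):
--             best_buy = (resource, b)
--         if s != 0 and (best_sell is None or s > best_sell[1]):
--             best_sell = (resource, s)
--     if best_buy is None or best_sell is None:
--         raise ValueError("data contains no nonzero buy or sell offers")
--     return best_buy[0], best_sell[0]
-- ===== Notes on version B (the rewrite author's own statement) =====
-- stated objective: simpler
-- what changed: Instead of building two intermediate filtered dicts and then running min/max with a lookup key over them, B makes a single pass over data tracking the cheapest nonzero buy and the most expensive nonzero sell with strict comparisons (first occurrence wins on ties); Pre_ excludes inputs where A raises (missing buy/sell keys, or no nonzero buy or no nonzero sell) and duplicate-key association lists that do not correspond to a dict.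
import Mathlib
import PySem

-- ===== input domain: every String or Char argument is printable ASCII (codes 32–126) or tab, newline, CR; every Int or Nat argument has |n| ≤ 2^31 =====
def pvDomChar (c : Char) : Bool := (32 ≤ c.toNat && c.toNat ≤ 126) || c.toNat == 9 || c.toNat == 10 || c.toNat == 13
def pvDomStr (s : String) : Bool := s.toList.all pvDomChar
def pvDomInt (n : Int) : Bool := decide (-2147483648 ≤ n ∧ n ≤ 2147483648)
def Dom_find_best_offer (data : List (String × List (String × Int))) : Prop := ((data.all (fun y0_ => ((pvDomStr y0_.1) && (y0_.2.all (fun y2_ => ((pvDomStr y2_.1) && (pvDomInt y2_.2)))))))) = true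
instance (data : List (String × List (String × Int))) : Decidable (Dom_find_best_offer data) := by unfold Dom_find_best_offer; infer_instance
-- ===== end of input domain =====

-- B replaces A's two intermediate filtered dicts + min/max-with-key scans by one single pass
-- over the data that tracks the cheapest nonzero buy and the dearest nonzero sell (objective: simpler).


-- shared helper: first-match lookup in an inner dict (assoc list); Pre_ guarantees the key is
-- present (the Python raises KeyError otherwise), so the 0 default is never reached inside Pre_.
def pvLookup (m : List (String × Int)) (k : String) : Int :=
  ((m.find? (fun p => p.1 == k)).map Prod.snd).getD 0

-- ===== PORT A =====
-- dict comprehensions → foldl with PySem.Dict.insert; min/max over the dict's keys with a lookup key.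
def find_best_offer (data : List (String × List (String × Int))) : String × String :=
  let buy_to_check : PySem.Dict String Int :=
    data.foldl (fun d rm =>
      if pvLookup rm.2 "buy" ≠ 0 then d.insert rm.1 (pvLookup rm.2 "buy") else d) PySem.Dict.empty
  let sell_to_check : PySem.Dict String Int :=
    data.foldl (fun d rm =>
      if pvLookup rm.2 "sell" ≠ 0 then d.insert rm.1 (pvLookup rm.2 "sell") else d) PySem.Dict.empty
  let best_buy := PySem.List.min? buy_to_check.keys (fun x => buy_to_check.getD x 0)
  let best_sell := PySem.List.max? sell_to_check.keys (fun x => sell_to_check.getD x 0)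
  -- Python raises ValueError on an empty candidate set; Pre_ excludes that, "" is the dummy.
  (best_buy.getD "", best_sell.getD "")

-- ===== PORT B =====
-- single pass with two optional (key, value) trackers; strict comparisons keep the first extremum.
def find_best_offer_alt (data : List (String × List (String × Int))) : String × String :=
  let st := data.foldl (fun st rm =>
      let b := pvLookup rm.2 "buy"
      let s := pvLookup rm.2 "sell"
      let bb := if b ≠ 0 then
          match st.1 with
          | none => some (rm.1, b)
          | some kv => if b < kv.2 then some (rm.1, b) else some kv
        else st.1
      let bs := if s ≠ 0 then
          match st.2 with
          | none => some (rm.1, s)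
          | some kv => if kv.2 < s then some (rm.1, s) else some kv
        else st.2
      (bb, bs))
    ((none, none) : Option (String × Int) × Option (String × Int))
  match st.1, st.2 with
  | some bkv, some skv => (bkv.1, skv.1)
  | _, _ => ("", "")  -- the Python B raises ValueError here; Pre_ excludes it

-- ===== PRECONDITION & SPEC =====
-- Pre_ excludes: association lists with duplicate outer or inner keys (they do not correspond to a
-- Python dict argument, so A's list-level behaviour there is not defined by the Python); inner dicts
-- missing a "buy"/"sell" key (Python raises KeyError); and data with no nonzero buy or no nonzero
-- sell (A's min/max raise ValueError; B raises ValueError too).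
def Pre_find_best_offer (data : List (String × List (String × Int))) : Prop :=
  (data.map Prod.fst).Nodup ∧
  (∀ rm ∈ data, (rm.2.map Prod.fst).Nodup ∧
      "buy" ∈ rm.2.map Prod.fst ∧ "sell" ∈ rm.2.map Prod.fst) ∧
  (∃ rm ∈ data, pvLookup rm.2 "buy" ≠ 0) ∧
  (∃ rm ∈ data, pvLookup rm.2 "sell" ≠ 0)
instance (data : List (String × List (String × Int))) : Decidable (Pre_find_best_offer data) := by
  unfold Pre_find_best_offer; infer_instance

def pvWitness_find_best_offer : (List (String × List (String × Int))) :=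
  [("ore", [("buy", 3), ("sell", 5)]), ("gas", [("buy", 2), ("sell", 7)])]

def Spec_find_best_offer (data : List (String × List (String × Int))) (out : String × String) : Prop := out = find_best_offer_alt data
instance (data : List (String × List (String × Int))) (out : String × String) : Decidable (Spec_find_best_offer data out) := by unfold Spec_find_best_offer; infer_instance

-- ===== CLAIM (what is proved, stated in full; the proofs are below) =====
def Claim_equal_find_best_offer : Prop := ∀ (data : List (String × List (String × Int))), Dom_find_best_offer data → Pre_find_best_offer data → Spec_find_best_offer data (find_best_offer data)

-- ===== LEMMAS AND PROOFS =====

-- the list of (resource, value) candidates with nonzero value, in order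
def pvFilt (key : String) (data : List (String × List (String × Int))) : List (String × Int) :=
  data.filterMap (fun rm => if pvLookup rm.2 key ≠ 0 then some (rm.1, pvLookup rm.2 key) else none)

-- the first-extremum tracker step over keys (A's min/max with a lookup key), generic in the comparison
def pvKStep (cmp : Int → Int → Prop) [DecidableRel cmp] (g : String → Int) (acc : Option String) (x : String) : Option String :=
  match acc with
  | none => some x
  | some m => if cmp (g x) (g m) then some x else some m

theorem pvMin_eq (K : List String) (g : String → Int) :
    PySem.List.min? K g = K.foldl (pvKStep (· < ·) g) none := by
  unfold PySem.List.min?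
  congr 1
  funext a x
  cases a <;> rfl

theorem pvMax_eq (K : List String) (g : String → Int) :
    PySem.List.max? K g = K.foldl (pvKStep (fun a b => b < a) g) none := by
  unfold PySem.List.max?
  congr 1
  funext a x
  cases a <;> rfl

-- the first-extremum tracker step, generic in the comparison
def pvStep (cmp : Int → Int → Prop) [DecidableRel cmp] (acc : Option (String × Int)) (p : String × Int) : Option (String × Int) :=
  match acc with
  | none => some p
  | some m => if cmp p.2 m.2 then some p else some m

theorem pvFilt_cons (key : String) (rm : String × List (String × Int))
    (rest : List (String × List (String × Int))) :
    pvFilt key (rm :: rest)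
      = (if pvLookup rm.2 key ≠ 0 then [(rm.1, pvLookup rm.2 key)] else []) ++ pvFilt key rest := by
  by_cases h : pvLookup rm.2 key ≠ 0 <;> simp [pvFilt, h]

theorem pvFilt_keys_sublist (key : String) (data : List (String × List (String × Int))) :
    ((pvFilt key data).map Prod.fst).Sublist (data.map Prod.fst) := by
  induction data with
  | nil => simp [pvFilt]
  | cons rm rest ih =>
      rw [pvFilt_cons]
      by_cases h : pvLookup rm.2 key ≠ 0
      · simpa [h] using List.Sublist.cons₂ rm.1 ih
      · simpa [h] using List.Sublist.cons rm.1 ih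

theorem pvDict_fold (key : String) (data : List (String × List (String × Int)))
    (l : List (String × Int))
    (hnd : (data.map Prod.fst).Nodup)
    (hdisj : ∀ rm ∈ data, ∀ p ∈ l, p.1 ≠ rm.1) :
    data.foldl (fun d rm =>
      if pvLookup rm.2 key ≠ 0 then d.insert rm.1 (pvLookup rm.2 key) else d)
      (PySem.Dict.mk l)
    = PySem.Dict.mk (l ++ pvFilt key data) := by
  induction data generalizing l with
  | nil => simp [pvFilt]
  | cons rm rest ih =>
      have hnd' : (rest.map Prod.fst).Nodup := (List.nodup_cons.mp hnd).2
      have hhead : rm.1 ∉ rest.map Prod.fst := (List.nodup_cons.mp hnd).1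
      rw [List.foldl_cons, pvFilt_cons]
      by_cases h : pvLookup rm.2 key ≠ 0
      · have hins : (PySem.Dict.mk l).insert rm.1 (pvLookup rm.2 key)
            = PySem.Dict.mk (l ++ [(rm.1, pvLookup rm.2 key)]) := by
          have hc : (PySem.Dict.mk l).contains rm.1 = false := by
            simp only [PySem.Dict.contains, List.any_eq_false]
            intro p hp
            simpa using hdisj rm (by simp) p hp
          simp [PySem.Dict.insert, hc]
        rw [if_pos h, hins, ih (l ++ [(rm.1, pvLookup rm.2 key)]) hnd' ?_]
        · simp [h]
        · intro rm' hrm' p hp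
          rcases List.mem_append.mp hp with hp | hp
          · exact hdisj rm' (by simp [hrm']) p hp
          · simp only [List.mem_singleton] at hp
            subst hp
            intro hEq
            simp only at hEq
            have hm : rm'.1 ∈ List.map Prod.fst rest := List.mem_map_of_mem hrm'
            rw [← hEq] at hm
            exact hhead hm
      · rw [if_neg h, ih l hnd' (fun rm' hrm' p hp => hdisj rm' (by simp [hrm']) p hp)]
        simp [h]

theorem pvFind_nodup (l : List (String × Int)) (p : String × Int)
    (hnd : (l.map Prod.fst).Nodup) (hp : p ∈ l) :
    l.find? (fun q => q.1 == p.1) = some p := by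
  induction l with
  | nil => simp at hp
  | cons q rest ih =>
      rcases List.mem_cons.mp hp with h | h
      · subst h; simp [List.find?]
      · have hq : q.1 ≠ p.1 := by
          intro hEq
          have hm : p.1 ∈ rest.map Prod.fst := List.mem_map_of_mem h
          exact (List.nodup_cons.mp hnd).1 (hEq ▸ hm)
        rw [List.find?_cons_of_neg (by simpa using hq)]
        exact ih (List.nodup_cons.mp hnd).2 h

theorem pvMinKeys (cmp : Int → Int → Prop) [DecidableRel cmp] (l : List (String × Int)) (g : String → Int)
    (acc : Option (String × Int))
    (hg : ∀ p ∈ l, g p.1 = p.2) (hacc : ∀ q, acc = some q → g q.1 = q.2) :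
    (l.map Prod.fst).foldl (pvKStep cmp g) (acc.map Prod.fst)
    = (l.foldl (pvStep cmp) acc).map Prod.fst := by
  induction l generalizing acc with
  | nil => simp
  | cons p rest ih =>
      simp only [List.map_cons, List.foldl_cons]
      have hgp : g p.1 = p.2 := hg p (by simp)
      cases acc with
      | none =>
          exact ih (some p) (fun q hq => hg q (by simp [hq]))
            (by rintro q hq; cases hq; exact hgp)
      | some m =>
          have hgm : g m.1 = m.2 := hacc m rfl
          simp only [Option.map_some, pvStep, pvKStep, hgp, hgm]
          by_cases hcmp : cmp p.2 m.2
          · rw [if_pos hcmp, if_pos hcmp]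
            exact ih (some p) (fun q hq => hg q (by simp [hq]))
              (by rintro q hq; cases hq; exact hgp)
          · rw [if_neg hcmp, if_neg hcmp]
            exact ih (some m) (fun q hq => hg q (by simp [hq]))
              (by rintro q hq; cases hq; exact hgm)

theorem pvTrack (cmp : Int → Int → Prop) [DecidableRel cmp] (key : String)
    (data : List (String × List (String × Int))) (acc : Option (String × Int)) :
    data.foldl (fun st rm =>
        if pvLookup rm.2 key ≠ 0 then pvStep cmp st (rm.1, pvLookup rm.2 key) else st) acc
    = (pvFilt key data).foldl (pvStep cmp) acc := by
  induction data generalizing acc with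
  | nil => simp [pvFilt]
  | cons rm rest ih =>
      rw [List.foldl_cons, pvFilt_cons, List.foldl_append]
      by_cases h : pvLookup rm.2 key ≠ 0
      · rw [if_pos h, if_pos h, List.foldl_cons, List.foldl_nil, ih]
      · rw [if_neg h, if_neg h, List.foldl_nil, ih]

theorem pvStep_isSome (cmp : Int → Int → Prop) [DecidableRel cmp] (l : List (String × Int)) (q : String × Int) :
    (l.foldl (pvStep cmp) (some q)).isSome := by
  induction l generalizing q with
  | nil => simp
  | cons p rest ih =>
      simp only [List.foldl_cons, pvStep]
      split <;> exact ih _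

theorem pvFold_ne_none (cmp : Int → Int → Prop) [DecidableRel cmp] (l : List (String × Int)) (hne : l ≠ []) :
    (l.foldl (pvStep cmp) none).isSome := by
  cases l with
  | nil => exact absurd rfl hne
  | cons p rest => simpa [pvStep] using pvStep_isSome cmp rest p

theorem pvFilt_ne_nil (key : String) (data : List (String × List (String × Int)))
    (h : ∃ rm ∈ data, pvLookup rm.2 key ≠ 0) : pvFilt key data ≠ [] := by
  rcases h with ⟨rm, hrm, hv⟩
  intro hnil
  have hmem : (rm.1, pvLookup rm.2 key) ∈ pvFilt key data := by
    simp only [pvFilt, List.mem_filterMap]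
    exact ⟨rm, hrm, by simp [hv]⟩
  simp [hnil] at hmem

-- one side of A equals the corresponding fold of pvStep over pvFilt
theorem pvSideA (cmp : Int → Int → Prop) [DecidableRel cmp] (key : String)
    (data : List (String × List (String × Int)))
    (hnd : (data.map Prod.fst).Nodup) :
    (data.foldl (fun d rm =>
        if pvLookup rm.2 key ≠ 0 then d.insert rm.1 (pvLookup rm.2 key) else d) PySem.Dict.empty).keys.foldl
      (pvKStep cmp (fun x => (data.foldl (fun d rm =>
          if pvLookup rm.2 key ≠ 0 then d.insert rm.1 (pvLookup rm.2 key) else d) PySem.Dict.empty).getD x 0)) none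
    = ((pvFilt key data).foldl (pvStep cmp) none).map Prod.fst := by
  have hd : data.foldl (fun d rm =>
      if pvLookup rm.2 key ≠ 0 then d.insert rm.1 (pvLookup rm.2 key) else d) PySem.Dict.empty
      = PySem.Dict.mk (pvFilt key data) := by
    have h := pvDict_fold key data [] hnd (by simp)
    simpa [PySem.Dict.empty] using h
  have hndf : ((pvFilt key data).map Prod.fst).Nodup :=
    (pvFilt_keys_sublist key data).nodup hnd
  rw [hd]
  have hkeys : (PySem.Dict.mk (pvFilt key data)).keys = (pvFilt key data).map Prod.fst := rfl
  rw [hkeys]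
  have h := pvMinKeys cmp (pvFilt key data)
      (fun x => (PySem.Dict.mk (pvFilt key data)).getD x 0) none
      (fun p hp => by
        simp [PySem.Dict.getD, PySem.Dict.get?, pvFind_nodup _ p hndf hp])
      (by simp)
  simpa using h

theorem pvSideA_min (data : List (String × List (String × Int)))
    (hnd : (data.map Prod.fst).Nodup) :
    PySem.List.min?
      (data.foldl (fun d rm =>
        if pvLookup rm.2 "buy" ≠ 0 then d.insert rm.1 (pvLookup rm.2 "buy") else d) PySem.Dict.empty).keys
      (fun x => (data.foldl (fun d rm =>
        if pvLookup rm.2 "buy" ≠ 0 then d.insert rm.1 (pvLookup rm.2 "buy") else d) PySem.Dict.empty).getD x 0)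
    = ((pvFilt "buy" data).foldl (pvStep (· < ·)) none).map Prod.fst := by
  rw [pvMin_eq]
  exact pvSideA (· < ·) "buy" data hnd

theorem pvSideA_max (data : List (String × List (String × Int)))
    (hnd : (data.map Prod.fst).Nodup) :
    PySem.List.max?
      (data.foldl (fun d rm =>
        if pvLookup rm.2 "sell" ≠ 0 then d.insert rm.1 (pvLookup rm.2 "sell") else d) PySem.Dict.empty).keys
      (fun x => (data.foldl (fun d rm =>
        if pvLookup rm.2 "sell" ≠ 0 then d.insert rm.1 (pvLookup rm.2 "sell") else d) PySem.Dict.empty).getD x 0)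
    = ((pvFilt "sell" data).foldl (pvStep (fun a b => b < a)) none).map Prod.fst := by
  rw [pvMax_eq]
  exact pvSideA (fun a b => b < a) "sell" data hnd

-- B's single fold over a pair of trackers is the pair of the two single-tracker folds
theorem pvAltFold (data : List (String × List (String × Int)))
    (acc : Option (String × Int) × Option (String × Int)) :
    data.foldl (fun st rm =>
      let b := pvLookup rm.2 "buy"
      let s := pvLookup rm.2 "sell"
      let bb := if b ≠ 0 then
          match st.1 with
          | none => some (rm.1, b)
          | some kv => if b < kv.2 then some (rm.1, b) else some kv
        else st.1
      let bs := if s ≠ 0 then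
          match st.2 with
          | none => some (rm.1, s)
          | some kv => if kv.2 < s then some (rm.1, s) else some kv
        else st.2
      (bb, bs)) acc
    = (data.foldl (fun st rm =>
          if pvLookup rm.2 "buy" ≠ 0 then pvStep (· < ·) st (rm.1, pvLookup rm.2 "buy") else st) acc.1,
       data.foldl (fun st rm =>
          if pvLookup rm.2 "sell" ≠ 0 then pvStep (fun a b => b < a) st (rm.1, pvLookup rm.2 "sell") else st) acc.2) := by
  induction data generalizing acc with
  | nil => rfl
  | cons rm rest ih => exact ih _

-- ===== VERDICT (by name: the statement is the Claim_ definition above) =====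
theorem find_best_offer_spec : Claim_equal_find_best_offer := by
  intro data _ hpre
  obtain ⟨hnd, _hkeys, hbuy, hsell⟩ := hpre
  have hFb := pvFold_ne_none (· < ·) _ (pvFilt_ne_nil "buy" data hbuy)
  have hFs := pvFold_ne_none (fun a b => b < a) _ (pvFilt_ne_nil "sell" data hsell)
  obtain ⟨bkv, hb⟩ := Option.isSome_iff_exists.mp hFb
  obtain ⟨skv, hs⟩ := Option.isSome_iff_exists.mp hFs
  show find_best_offer data = find_best_offer_alt data
  simp only [find_best_offer, find_best_offer_alt]
  rw [pvAltFold, pvSideA_min data hnd, pvSideA_max data hnd, pvTrack, pvTrack, hb, hs]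
  simp
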